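-- pv_equiv track=rewrite | github.com/albheim/hashcode2022 | main.py | find_contributor_with_skill
-- ===== SOURCE A (Python) =====
-- def find_contributor_with_skill(needed_skill, needed_level, has_skills, busy_people, suggestion, t):
--     for level in range(needed_level, 101):
--         key = (needed_skill, level)
--         if key in has_skills:
--             possible = sorted(has_skills[key], key=lambda x: x[1])
--             for person, _ in possible:
--                 if busy_people[person] <= t and person not in [s[0] for s in suggestion]:
--                     return person, key
--
--     return None, None
-- ===== SOURCE B (Python) =====
-- def find_contributor_with_skill(needed_skill, needed_level, has_skills, busy_people, suggestion, t):
--     taken = {s[0] for s in suggestion}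
--     cands = []
--     for level in range(needed_level, 101):
--         for person, x1 in has_skills.get((needed_skill, level), ()):
--             free_at = busy_people.get(person)
--             if free_at is not None and free_at <= t and person not in taken:
--                 cands.append((level, x1, person))
--     if not cands:
--         return None, None
--     level, x1, person = min(cands, key=lambda c: (c[0], c[1]))
--     return person, (needed_skill, level)
-- ===== Notes on version B (the rewrite author's own statement) =====
-- stated objective: alternative
-- what changed: A's short-circuiting level loop with a per-level sort and early return is replaced by a single collect pass that gathers every eligible (level, x1, person) candidate over all levels and then takes the stable minimum by (level, x1); no sorting and no early return.
-- outside the precondition, e.g. on find_contributor_with_skill('s', 1, {('s', 1): [('b', 0)]}, {}, [], 0): A raises KeyError, B returns (None, None)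
import Mathlib
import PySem

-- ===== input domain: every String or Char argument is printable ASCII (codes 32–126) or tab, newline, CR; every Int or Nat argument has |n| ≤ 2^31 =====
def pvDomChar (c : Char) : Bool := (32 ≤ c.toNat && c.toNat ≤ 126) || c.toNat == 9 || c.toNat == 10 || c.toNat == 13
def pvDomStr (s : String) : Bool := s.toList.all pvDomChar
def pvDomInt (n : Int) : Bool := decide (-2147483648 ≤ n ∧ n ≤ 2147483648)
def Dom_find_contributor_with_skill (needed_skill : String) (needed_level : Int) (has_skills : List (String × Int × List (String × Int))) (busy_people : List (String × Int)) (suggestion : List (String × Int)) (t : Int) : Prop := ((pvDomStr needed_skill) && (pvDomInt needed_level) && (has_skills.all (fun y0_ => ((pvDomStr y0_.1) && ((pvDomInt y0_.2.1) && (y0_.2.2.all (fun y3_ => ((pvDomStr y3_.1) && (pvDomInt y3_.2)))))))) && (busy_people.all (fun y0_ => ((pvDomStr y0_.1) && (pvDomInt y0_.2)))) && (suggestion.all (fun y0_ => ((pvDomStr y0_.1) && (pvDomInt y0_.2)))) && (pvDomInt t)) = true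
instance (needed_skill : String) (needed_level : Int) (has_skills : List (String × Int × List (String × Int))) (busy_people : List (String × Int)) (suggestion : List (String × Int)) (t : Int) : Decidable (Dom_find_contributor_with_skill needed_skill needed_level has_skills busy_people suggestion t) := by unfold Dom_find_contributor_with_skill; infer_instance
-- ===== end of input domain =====

-- B replaces A's short-circuiting level loop (with a per-level sort) by a collect-then-select pass: it gathers every
-- eligible (level, x1, person) candidate and takes the stable minimum by (level, x1); objective: alternative decomposition.

-- ===== PORT A =====
-- dict lookup has_skills[(needed_skill, level)] / 'key in has_skills': first matching key of the association list
def pvSkillLookup (has_skills : List (String × Int × List (String × Int))) (needed_skill : String) (level : Int) : Option (String × Int × List (String × Int)) :=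
  has_skills.find? (fun e => e.1 == needed_skill && e.2.1 == level)

-- busy_people[person]: first-match dict lookup; the default 0 is only reached where Python raises KeyError (outside Pre_)
def pvBusyGet (busy_people : List (String × Int)) (person : String) : Int :=
  ((busy_people.find? (fun kv => kv.1 == person)).map (fun kv => kv.2)).getD 0

-- 'if busy_people[person] <= t and person not in [s[0] for s in suggestion]'
def pvEligA (busy_people : List (String × Int)) (suggestion : List (String × Int)) (t : Int) (pr : String × Int) : Bool :=
  decide (pvBusyGet busy_people pr.1 ≤ t) && !((suggestion.map (fun s => s.1)).contains pr.1)

-- 'for level in range(needed_level, 101): … return person, key' — the for loop with early return, level by level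
def pvLoopA (needed_skill : String) (has_skills : List (String × Int × List (String × Int))) (busy_people : List (String × Int)) (suggestion : List (String × Int)) (t : Int) : List Int → Option String × (Option (String × Int))
  | [] => (none, none)
  | level :: rest =>
    match pvSkillLookup has_skills needed_skill level with
    | some e =>
      -- possible = sorted(has_skills[key], key=lambda x: x[1]); 'for person, _ in possible: if …: return' = first hit
      match (PySem.List.sorted e.2.2 (fun x => x.2) false).find? (pvEligA busy_people suggestion t) with
      | some pr => (some pr.1, some (needed_skill, level))
      | none => pvLoopA needed_skill has_skills busy_people suggestion t rest
    | none => pvLoopA needed_skill has_skills busy_people suggestion t rest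

def find_contributor_with_skill (needed_skill : String) (needed_level : Int) (has_skills : List (String × Int × List (String × Int))) (busy_people : List (String × Int)) (suggestion : List (String × Int)) (t : Int) : Option String × (Option (String × Int)) :=
  pvLoopA needed_skill has_skills busy_people suggestion t (PySem.List.pyRange needed_level 101 1)

-- ===== PORT B =====
-- taken = {s[0] for s in suggestion}
def pvTaken (suggestion : List (String × Int)) : PySem.Set String :=
  PySem.Set.ofList (suggestion.map (fun s => s.1))

-- 'free_at = busy_people.get(person); if free_at is not None and free_at <= t and person not in taken'
def pvEligB (busy_people : List (String × Int)) (suggestion : List (String × Int)) (t : Int) (pr : String × Int) : Bool :=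
  match busy_people.find? (fun kv => kv.1 == pr.1) with
  | none => false
  | some kv => decide (kv.2 ≤ t) && !(PySem.Set.contains (pvTaken suggestion) pr.1)

-- the nested collect loop: for level in range(needed_level, 101): for person, x1 in bucket: if eligible: append
def pvCands (needed_skill : String) (needed_level : Int) (has_skills : List (String × Int × List (String × Int))) (busy_people : List (String × Int)) (suggestion : List (String × Int)) (t : Int) : List (Int × Int × String) :=
  (PySem.List.pyRange needed_level 101 1).flatMap (fun level =>
    (((has_skills.find? (fun e => e.1 == needed_skill && e.2.1 == level)).map (fun e => e.2.2)).getD []).filterMap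
      (fun pr => if pvEligB busy_people suggestion t pr then some (level, pr.2, pr.1) else none))

-- min(cands, key=lambda c: (c[0], c[1])) on the nonempty collection, else (None, None)
def find_contributor_with_skill_alt (needed_skill : String) (needed_level : Int) (has_skills : List (String × Int × List (String × Int))) (busy_people : List (String × Int)) (suggestion : List (String × Int)) (t : Int) : Option String × (Option (String × Int)) :=
  match PySem.List.min2? (pvCands needed_skill needed_level has_skills busy_people suggestion t) (fun c => c.1) (fun c => c.2.1) with
  | none => (none, none)
  | some c => (some c.2.2, some (needed_skill, c.1))

-- ===== PRECONDITION & SPEC =====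
-- Pre_ excludes inputs on which some contributor listed under the needed skill at a level in [needed_level, 100] is
-- missing from busy_people: A raises KeyError on such inputs unless its early return fires before the scan reaches the
-- missing entry (B skips unknown persons, returns everywhere, and still yields A's value wherever A returns).
def Pre_find_contributor_with_skill (needed_skill : String) (needed_level : Int) (has_skills : List (String × Int × List (String × Int))) (busy_people : List (String × Int)) (suggestion : List (String × Int)) (t : Int) : Prop :=
  ∀ e ∈ has_skills, e.1 = needed_skill → needed_level ≤ e.2.1 → e.2.1 ≤ 100 →
    ∀ pr ∈ e.2.2, (busy_people.map (fun kv => kv.1)).contains pr.1 = true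
instance (needed_skill : String) (needed_level : Int) (has_skills : List (String × Int × List (String × Int))) (busy_people : List (String × Int)) (suggestion : List (String × Int)) (t : Int) : Decidable (Pre_find_contributor_with_skill needed_skill needed_level has_skills busy_people suggestion t) := by unfold Pre_find_contributor_with_skill; infer_instance

def pvWitness_find_contributor_with_skill : String × Int × (List (String × Int × List (String × Int))) × (List (String × Int)) × (List (String × Int)) × Int :=
  ("a", 1, [("a", 1, [("p", 3)])], [("p", 0)], [], 5)

def Spec_find_contributor_with_skill (needed_skill : String) (needed_level : Int) (has_skills : List (String × Int × List (String × Int))) (busy_people : List (String × Int)) (suggestion : List (String × Int)) (t : Int) (out : Option String × (Option (String × Int))) : Prop := out = find_contributor_with_skill_alt needed_skill needed_level has_skills busy_people suggestion t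
instance (needed_skill : String) (needed_level : Int) (has_skills : List (String × Int × List (String × Int))) (busy_people : List (String × Int)) (suggestion : List (String × Int)) (t : Int) (out : Option String × (Option (String × Int))) : Decidable (Spec_find_contributor_with_skill needed_skill needed_level has_skills busy_people suggestion t out) := by unfold Spec_find_contributor_with_skill; infer_instance

-- ===== CLAIM (what is proved, stated in full; the proofs are below) =====
def Claim_equal_find_contributor_with_skill : Prop := ∀ (needed_skill : String) (needed_level : Int) (has_skills : List (String × Int × List (String × Int))) (busy_people : List (String × Int)) (suggestion : List (String × Int)) (t : Int), Dom_find_contributor_with_skill needed_skill needed_level has_skills busy_people suggestion t → Pre_find_contributor_with_skill needed_skill needed_level has_skills busy_people suggestion t → Spec_find_contributor_with_skill needed_skill needed_level has_skills busy_people suggestion t (find_contributor_with_skill needed_skill needed_level has_skills busy_people suggestion t)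

-- ===== LEMMAS AND PROOFS =====

-- the suggestion-set membership test equals the plain list membership test
set_option maxRecDepth 4000 in
theorem pvTaken_contains_eq (suggestion : List (String × Int)) (x : String) :
    PySem.Set.contains (PySem.Set.ofList (suggestion.map (fun s => s.1))) x = (suggestion.map (fun s => s.1)).contains x := by
  have h3 : decide (x ∈ PySem.Set.ofList (suggestion.map (fun s => s.1))) = decide (x ∈ suggestion.map (fun s => s.1)) := by
    simp only [decide_eq_decide]
    exact PySem.Set.mem_ofList _ _
  simp [PySem.Set.contains, h3]

-- for a person present among busy_people's keys, B's guarded eligibility equals A's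
theorem pvEligB_eq_of_mem (busy_people : List (String × Int)) (suggestion : List (String × Int)) (t : Int) (pr : String × Int)
    (h : (busy_people.map (fun kv => kv.1)).contains pr.1 = true) :
    pvEligB busy_people suggestion t pr = pvEligA busy_people suggestion t pr := by
  have hex : ∃ kv, busy_people.find? (fun kv => kv.1 == pr.1) = some kv := by
    rw [← Option.isSome_iff_exists, List.find?_isSome]
    simp only [List.contains_eq_any_beq, List.any_map, List.any_eq_true, Function.comp] at h
    obtain ⟨kv, hkv, hb⟩ := h
    refine ⟨kv, hkv, ?_⟩
    simp only [beq_iff_eq] at hb ⊢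
    exact hb.symm
  obtain ⟨kv, hkv⟩ := hex
  unfold pvEligB pvEligA pvBusyGet pvTaken
  rw [hkv, pvTaken_contains_eq]
  rfl

-- the filterMap comprehension body over a bucket whose persons are all present = map of the filtered bucket
theorem filterMap_bucket (busy_people : List (String × Int)) (suggestion : List (String × Int)) (t : Int) (level : Int) (ms : List (String × Int))
    (h : ∀ pr ∈ ms, (busy_people.map (fun kv => kv.1)).contains pr.1 = true) :
    ms.filterMap (fun pr => if pvEligB busy_people suggestion t pr then some ((level, pr.2, pr.1) : Int × Int × String) else none) =
      (ms.filter (pvEligA busy_people suggestion t)).map (fun pr => (level, pr.2, pr.1)) := by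
  rw [List.filterMap_congr (fun pr hpr => by rw [pvEligB_eq_of_mem busy_people suggestion t pr (h pr hpr)])]
  clear h
  induction ms with
  | nil => rfl
  | cons pr ms ih =>
    rw [List.filterMap_cons, List.filter_cons]
    cases h : pvEligA busy_people suggestion t pr <;> simp [ih]

-- find? over insertBy, inserted element not matching
theorem find?_insertBy_neg {α : Type} (before : α → α → Bool) (p : α → Bool) (a : α) (hpa : p a = false) :
    ∀ s : List α, (PySem.List.insertBy before a s).find? p = s.find? p := by
  intro s
  induction s with
  | nil => simp [PySem.List.insertBy, List.find?, hpa]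
  | cons y ys ih =>
    by_cases hb : before a y = true
    · simp [PySem.List.insertBy, hb, List.find?, hpa]
    · simp only [PySem.List.insertBy, hb]
      cases hpy : p y <;> simp [List.find?, hpy, ih]

-- find? over insertBy into a key-sorted list, inserted element matching: stable-minimum behaviour
theorem find?_insertBy_pos {α : Type} (key : α → Int) (p : α → Bool) (a : α) (hpa : p a = true) :
    ∀ s : List α, s.Pairwise (fun u v => key u ≤ key v) →
      (PySem.List.insertBy (fun u v => decide (key u < key v)) a s).find? p =
        (match s.find? p with
         | none => some a
         | some m => if key a < key m then some a else some m) := by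
  intro s
  induction s with
  | nil => intro _; simp [PySem.List.insertBy, List.find?, hpa]
  | cons y ys ih =>
    intro hs
    rw [List.pairwise_cons] at hs
    by_cases hlt : key a < key y
    · simp only [PySem.List.insertBy, decide_eq_true_eq, if_pos hlt]
      rw [List.find?_cons_of_pos hpa]
      cases hf : (y :: ys).find? p with
      | none => rfl
      | some m =>
        have hmem : m ∈ y :: ys := List.mem_of_find?_eq_some hf
        have hym : key y ≤ key m := by
          rcases List.mem_cons.mp hmem with h | h
          · exact le_of_eq (congrArg key h.symm)
          · exact hs.1 m h
        simp [lt_of_lt_of_le hlt hym]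
    · simp only [PySem.List.insertBy, decide_eq_true_eq, if_neg hlt]
      cases hpy : p y with
      | true =>
        rw [List.find?_cons_of_pos hpy, List.find?_cons_of_pos hpy]
        simp [hlt]
      | false =>
        rw [List.find?_cons_of_neg (by simp [hpy]), List.find?_cons_of_neg (by simp [hpy])]
        exact ih hs.2

-- CRUX: the first hit of a scan over the stable sort = the first minimum of the filtered original list
theorem find?_sorted_eq_min?_filter {α : Type} (key : α → Int) (p : α → Bool) (ms : List α) :
    (PySem.List.sorted ms key false).find? p = PySem.List.min? (ms.filter p) key := by
  induction ms using List.reverseRecOn with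
  | nil => simp [PySem.List.sorted, PySem.List.min?]
  | append_singleton xs a ih =>
    have hsplit : PySem.List.sorted (xs ++ [a]) key false =
        PySem.List.insertBy (fun u v => decide (key u < key v)) a (PySem.List.sorted xs key false) := by
      rw [PySem.List.sorted_eq_foldl_insertBy, PySem.List.sorted_eq_foldl_insertBy, List.foldl_append]
      simp [List.foldl]
    have hmin : ∀ (l : List α), PySem.List.min? (l ++ [a]) key =
        (match PySem.List.min? l key with
         | none => some a
         | some m => if key a < key m then some a else some m) := by
      intro l
      rw [PySem.List.min?, List.foldl_append, List.foldl_cons, List.foldl_nil, ← PySem.List.min?]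
      cases PySem.List.min? l key with
      | none => rfl
      | some m => rfl
    cases hpa : p a with
    | false =>
      rw [hsplit, find?_insertBy_neg _ _ _ hpa, ih, List.filter_append]
      simp [hpa]
    | true =>
      rw [hsplit, find?_insertBy_pos key p a hpa _ (PySem.List.sorted_pairwise xs key), ih,
        List.filter_append]
      simp only [List.filter_cons, hpa, List.filter_nil, if_true]
      rw [hmin]

-- min2? of a list whose first key is constant is min? by the second key
theorem min2?_const_fst {α : Type} (k1 : α → Int) (k2 : α → Int) (c : Int) :
    ∀ (xs : List α) (acc : Option α), (∀ x ∈ xs, k1 x = c) → (∀ m, acc = some m → k1 m = c) →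
      xs.foldl (fun acc x =>
        match acc with
        | none => some x
        | some m => if (decide (k1 x < k1 m) || !decide (k1 m < k1 x) && decide (k2 x < k2 m)) = true then some x else some m) acc =
      xs.foldl (fun acc x =>
        match acc with
        | none => some x
        | some m => if k2 x < k2 m then some x else some m) acc := by
  intro xs
  induction xs with
  | nil => intro acc _ _; rfl
  | cons x xs ih =>
    intro acc hall hacc
    have hx : k1 x = c := hall x List.mem_cons_self
    simp only [List.foldl_cons]
    cases acc with
    | none =>
      exact ih (some x) (fun y hy => hall y (List.mem_cons_of_mem _ hy))
        (fun m' hm' => by cases hm'; exact hx)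
    | some m =>
      have hm : k1 m = c := hacc m rfl
      have hc : ¬ (k1 x < k1 m) := by rw [hx, hm]; exact lt_irrefl c
      have hc2 : ¬ (k1 m < k1 x) := by rw [hx, hm]; exact lt_irrefl c
      by_cases hk : k2 x < k2 m
      · simp only [hc, hc2, hk, decide_true, decide_false, Bool.false_or, Bool.not_false,
          Bool.true_and, if_true]
        exact ih (some x) (fun y hy => hall y (List.mem_cons_of_mem _ hy))
          (fun m' hm' => by cases hm'; exact hx)
      · simp only [hc, hc2, hk, decide_false, Bool.false_or, Bool.not_false,
          Bool.true_and, if_false]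
        exact ih (some m) (fun y hy => hall y (List.mem_cons_of_mem _ hy))
          (fun m' hm' => by cases hm'; exact hm)

theorem min2?_eq_min?_of_const_fst {α : Type} (k1 k2 : α → Int) (c : Int) (xs : List α)
    (h : ∀ x ∈ xs, k1 x = c) :
    PySem.List.min2? xs k1 k2 = PySem.List.min? xs k2 := by
  rw [PySem.List.min2?, PySem.List.min?]
  exact min2?_const_fst k1 k2 c xs none h (by intro m hm; cases hm)

-- min? commutes with map
theorem min?_map {α β : Type} (f : α → β) (k : β → Int) :
    ∀ (l : List α) (acc : Option α),
      (l.map f).foldl (fun acc x =>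
        match acc with
        | none => some x
        | some m => if k x < k m then some x else some m) (acc.map f) =
      (l.foldl (fun acc x =>
        match acc with
        | none => some x
        | some m => if k (f x) < k (f m) then some x else some m) acc).map f := by
  intro l
  induction l with
  | nil => intro acc; rfl
  | cons x l ih =>
    intro acc
    rw [List.map_cons, List.foldl_cons, List.foldl_cons]
    have step : (match acc.map f with
        | none => some (f x)
        | some m => if k (f x) < k m then some (f x) else some m) =
        Option.map f (match acc with
        | none => some x
        | some m => if k (f x) < k (f m) then some x else some m) := by
      cases acc with
      | none => rfl
      | some m => by_cases h : k (f x) < k (f m) <;> simp [h]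
    rw [step, ih]

theorem min?_map_eq {α β : Type} (f : α → β) (k : β → Int) (l : List α) :
    PySem.List.min? (l.map f) k = (PySem.List.min? l (fun x => k (f x))).map f := by
  rw [PySem.List.min?, PySem.List.min?]
  exact min?_map f k l none

-- a fixed minimum survives appending elements with strictly larger first key
theorem min2?_append_of_lt {α : Type} (k1 k2 : α → Int) (xs ys : List α) (m : α)
    (hm : PySem.List.min2? xs k1 k2 = some m) (h : ∀ y ∈ ys, k1 m < k1 y) :
    PySem.List.min2? (xs ++ ys) k1 k2 = some m := by
  rw [PySem.List.min2?, List.foldl_append, ← PySem.List.min2?, hm]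
  induction ys with
  | nil => rfl
  | cons y ys ih =>
    rw [List.foldl_cons]
    have hy : k1 m < k1 y := h y List.mem_cons_self
    have : (if (decide (k1 y < k1 m) || !decide (k1 m < k1 y) && decide (k2 y < k2 m)) = true then some y else some m) = some m := by
      simp [hy, not_lt_of_gt hy]
    simp only [this]
    exact ih (fun z hz => h z (List.mem_cons_of_mem _ hz))

-- candidates produced by a bucket at a given level carry that level as first component
theorem mem_flatMap_fst (needed_skill : String) (busy_people : List (String × Int)) (suggestion : List (String × Int)) (t : Int)
    (has_skills : List (String × Int × List (String × Int))) (ls : List Int) (c : Int × Int × String)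
    (hc : c ∈ ls.flatMap (fun level =>
      (((has_skills.find? (fun e => e.1 == needed_skill && e.2.1 == level)).map (fun e => e.2.2)).getD []).filterMap
        (fun pr => if pvEligB busy_people suggestion t pr then some (level, pr.2, pr.1) else none))) :
    c.1 ∈ ls := by
  rw [List.mem_flatMap] at hc
  obtain ⟨level, hl, hcl⟩ := hc
  rw [List.mem_filterMap] at hcl
  obtain ⟨pr, _, hpr⟩ := hcl
  by_cases he : pvEligB busy_people suggestion t pr = true
  · rw [if_pos he, Option.some_inj] at hpr
    cases hpr
    exact hl
  · rw [if_neg he] at hpr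
    cases hpr

-- MAIN: A's short-circuiting level loop equals B's collect-then-min over any strictly increasing level list whose
-- reachable buckets only mention persons present in busy_people
theorem loopA_eq_min (needed_skill : String) (has_skills : List (String × Int × List (String × Int))) (busy_people : List (String × Int)) (suggestion : List (String × Int)) (t : Int) :
    ∀ ls : List Int, ls.Pairwise (· < ·) →
      (∀ level ∈ ls, ∀ pr ∈ (((has_skills.find? (fun e => e.1 == needed_skill && e.2.1 == level)).map (fun e => e.2.2)).getD []),
        (busy_people.map (fun kv => kv.1)).contains pr.1 = true) →
      pvLoopA needed_skill has_skills busy_people suggestion t ls =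
        (match PySem.List.min2? (ls.flatMap (fun level =>
            (((has_skills.find? (fun e => e.1 == needed_skill && e.2.1 == level)).map (fun e => e.2.2)).getD []).filterMap
              (fun pr => if pvEligB busy_people suggestion t pr then some (level, pr.2, pr.1) else none))) (fun c => c.1) (fun c => c.2.1) with
         | none => (none, none)
         | some c => (some c.2.2, some (needed_skill, c.1))) := by
  intro ls
  induction ls with
  | nil => intro _ _; rfl
  | cons level rest ih =>
    intro hp hmem
    rw [List.pairwise_cons] at hp
    have hrest : ∀ l ∈ rest, ∀ pr ∈ (((has_skills.find? (fun e => e.1 == needed_skill && e.2.1 == l)).map (fun e => e.2.2)).getD []),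
        (busy_people.map (fun kv => kv.1)).contains pr.1 = true :=
      fun l hl => hmem l (List.mem_cons_of_mem _ hl)
    rw [List.flatMap_cons]
    cases hlk : pvSkillLookup has_skills needed_skill level with
    | none =>
      have hb : ((has_skills.find? (fun e => e.1 == needed_skill && e.2.1 == level)).map (fun e => e.2.2)).getD [] = ([] : List (String × Int)) := by
        rw [pvSkillLookup] at hlk; rw [hlk]; rfl
      rw [pvLoopA, hlk, hb]
      simpa using ih hp.2 hrest
    | some e =>
      have hb : ((has_skills.find? (fun e => e.1 == needed_skill && e.2.1 == level)).map (fun e => e.2.2)).getD [] = e.2.2 := by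
        rw [pvSkillLookup] at hlk; rw [hlk]; rfl
      have hbm : ∀ pr ∈ e.2.2, (busy_people.map (fun kv => kv.1)).contains pr.1 = true := by
        intro pr hpr
        exact hmem level List.mem_cons_self pr (by rw [hb]; exact hpr)
      rw [pvLoopA]
      simp only [hlk, hb, filterMap_bucket busy_people suggestion t level e.2.2 hbm,
        find?_sorted_eq_min?_filter (fun x : String × Int => x.2) (pvEligA busy_people suggestion t) e.2.2]
      cases hf : PySem.List.min? (e.2.2.filter (pvEligA busy_people suggestion t)) (fun x : String × Int => x.2) with
      | none =>
        have hnil : e.2.2.filter (pvEligA busy_people suggestion t) = [] :=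
          (PySem.List.min?_eq_none_iff _ _).mp hf
        simp only [hnil, List.map_nil, List.nil_append]
        exact ih hp.2 hrest
      | some pr =>
        have hblk : PySem.List.min2?
            ((e.2.2.filter (pvEligA busy_people suggestion t)).map (fun pr => ((level, pr.2, pr.1) : Int × Int × String)))
            (fun c => c.1) (fun c => c.2.1) = some (level, pr.2, pr.1) := by
          rw [min2?_eq_min?_of_const_fst (c := level)]
          · rw [min?_map_eq, hf]; rfl
          · intro x hx
            rw [List.mem_map] at hx
            obtain ⟨q, _, hq⟩ := hx
            cases hq; rfl
        rw [min2?_append_of_lt (fun c => c.1) (fun c => c.2.1) _ _ _ hblk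
          (fun y hy => hp.1 y.1 (mem_flatMap_fst needed_skill busy_people suggestion t has_skills rest y hy))]

-- range(needed_level, 101) is strictly increasing
theorem pyRange_one_pairwise (a b : Int) : (PySem.List.pyRange a b 1).Pairwise (· < ·) := by
  by_cases h : a < b
  · have : ∀ n : Nat, ∀ a : Int, (b - a).toNat = n → (PySem.List.pyRange a b 1).Pairwise (· < ·) := by
      intro n
      induction n with
      | zero =>
        intro a ha
        have he : PySem.List.pyRange a b 1 = [] := by
          rw [List.eq_nil_iff_forall_not_mem]
          intro x hx
          rw [PySem.List.mem_pyRange_one] at hx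
          omega
        rw [he]; exact List.Pairwise.nil
      | succ n ihn =>
        intro a ha
        by_cases hab : a < b
        · rw [PySem.List.pyRange_one_cons hab]
          refine List.pairwise_cons.mpr ⟨?_, ihn (a + 1) (by omega)⟩
          intro x hx
          rw [PySem.List.mem_pyRange_one] at hx
          omega
        · have he : PySem.List.pyRange a b 1 = [] := by
            rw [List.eq_nil_iff_forall_not_mem]
            intro x hx
            rw [PySem.List.mem_pyRange_one] at hx
            omega
          rw [he]; exact List.Pairwise.nil
    exact this (b - a).toNat a rfl
  · have he : PySem.List.pyRange a b 1 = [] := by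
      rw [List.eq_nil_iff_forall_not_mem]
      intro x hx
      rw [PySem.List.mem_pyRange_one] at hx
      omega
    rw [he]; exact List.Pairwise.nil

-- ===== VERDICT (by name: the statement is the Claim_ definition above) =====
theorem find_contributor_with_skill_spec : Claim_equal_find_contributor_with_skill := by
  intro needed_skill needed_level has_skills busy_people suggestion t _ hpre
  have hmem : ∀ level ∈ PySem.List.pyRange needed_level 101 1,
      ∀ pr ∈ (((has_skills.find? (fun e => e.1 == needed_skill && e.2.1 == level)).map (fun e => e.2.2)).getD []),
      (busy_people.map (fun kv => kv.1)).contains pr.1 = true := by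
    intro level hl pr hpr
    rw [PySem.List.mem_pyRange_one] at hl
    cases hfind : has_skills.find? (fun e => e.1 == needed_skill && e.2.1 == level) with
    | none => rw [hfind] at hpr; cases hpr
    | some e =>
      rw [hfind] at hpr
      have hein : e ∈ has_skills := List.mem_of_find?_eq_some hfind
      have hpred := List.find?_some hfind
      simp only [] at hpred
      rw [Bool.and_eq_true, beq_iff_eq, beq_iff_eq] at hpred
      exact hpre e hein hpred.1 (by omega) (by omega) pr hpr
  unfold Spec_find_contributor_with_skill find_contributor_with_skill find_contributor_with_skill_alt pvCands
  rw [loopA_eq_min needed_skill has_skills busy_people suggestion t _ (pyRange_one_pairwise needed_level 101) hmem]
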